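-- pv_equiv track=rewrite | github.com/aCuissot/RaceRecognition_internship_project | VGGFace2/given_scripts/Scripts_Vaccaro/Python_3/SVR_LFW_python.py | score_per_band
-- ===== SOURCE A (Python) =====
-- def score_per_band(prevision, ground_truth):
--     # Support parameters
--     ok = 0
--     young = 0
--     early_adult = 0
--     adult = 0
--     elder = 0
--     e_young = 0
--     e_early_adult = 0
--     e_adult = 0
--     e_elder = 0
--
--     # Band 1 : 0 <= x < A
--     # Band 2 : A <= x < B
--     # Band 3 : B <= x < C
--     # Band 4 : C <= x
--     A = 18
--     B = 46
--     C = 66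
--
--     for i in range(0, len(prevision)):
--
--         if ground_truth[i] < A:
--             truth = 'young'
--         elif A <= ground_truth[i] < B:
--             truth = 'early adult'
--         elif B <= ground_truth[i] < C:
--             truth = 'adult'
--         elif ground_truth[i] >= C:
--             truth = 'elder'
--
--         if prevision[i] < A:
--             test = 'young'
--         elif A <= prevision[i] < B:
--             test = 'early adult'
--         elif B <= prevision[i] < C:
--             test = 'adult'
--         elif prevision[i] >= C:
--             test = 'elder'
--
--         # The following code calculates correct decisions and errors for bands.
--         if truth == test:
--             if truth == 'young':
--                 young += 1
--             elif truth == 'early adult':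
--                 early_adult += 1
--             elif truth == 'adult':
--                 adult += 1
--             elif truth == 'elder':
--                 elder += 1
--
--         if truth != test:
--             if truth == 'young':
--                 e_young += 1
--             elif truth == 'early adult':
--                 e_early_adult += 1
--             elif truth == 'adult':
--                 e_adult += 1
--             elif truth == 'elder':
--                 e_elder += 1
--
--     # Creating a vector whose first 4 elements indicate the correct decisions, respectively of the 1, 2, 3 and 4 range.
--     # The following 4 elements indicate the wrong decisions, in the order of band 1,2,3,4.
--     score = [0 for x in range(8)]
--     score[0] = young
--     score[1] = early_adult
--     score[2] = adult
--     score[3] = elder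
--     score[4] = e_young
--     score[5] = e_early_adult
--     score[6] = e_adult
--     score[7] = e_elder
--     return score
-- ===== SOURCE B (Python) =====
-- def score_per_band(prevision, ground_truth):
--     # Staged counting: band each list, keep the truth-bands of the hits,
--     # then read the 8 scores off with .count (wrong = total - correct).
--     def band(x):
--         return (x >= 18) + (x >= 46) + (x >= 66)
--     truths = [band(ground_truth[i]) for i in range(len(prevision))]
--     preds = [band(x) for x in prevision]
--     hits = [t for t, p in zip(truths, preds) if t == p]
--     return [hits.count(b) for b in range(4)] + \
--            [truths.count(b) - hits.count(b) for b in range(4)]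
-- ===== Notes on version B (the rewrite author's own statement) =====
-- stated objective: alternative
-- what changed: Replaces A's single pass of string-label chains and 2x4 increment dispatch with staged passes: band both lists arithmetically (sum of comparisons), collect the truth-bands of the matching pairs, and read the 8 scores off with list.count, deriving the wrong counts as total-per-band minus correct.
import Mathlib
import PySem

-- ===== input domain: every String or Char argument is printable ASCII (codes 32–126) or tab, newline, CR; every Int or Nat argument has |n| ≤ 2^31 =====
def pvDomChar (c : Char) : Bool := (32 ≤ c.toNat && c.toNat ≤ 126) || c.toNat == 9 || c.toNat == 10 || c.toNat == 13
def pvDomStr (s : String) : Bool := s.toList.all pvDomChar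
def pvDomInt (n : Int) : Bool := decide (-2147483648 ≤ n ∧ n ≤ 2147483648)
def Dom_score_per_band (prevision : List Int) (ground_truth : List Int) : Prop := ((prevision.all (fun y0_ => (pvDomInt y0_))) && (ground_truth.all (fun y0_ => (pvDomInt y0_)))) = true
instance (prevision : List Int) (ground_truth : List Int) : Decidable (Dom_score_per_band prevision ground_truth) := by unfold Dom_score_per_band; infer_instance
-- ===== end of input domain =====

-- B replaces A's single-pass string-label dispatch with staged passes (band both lists,
-- collect hit bands, read scores off with count; wrong = total - correct); return-value
-- equivalence on Pre_ (objective: alternative decomposition).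

-- ===== PORT A =====
-- Loop state: (young, early_adult, adult, elder, e_young, e_early_adult, e_adult, e_elder)
abbrev ScoreState := Int × Int × Int × Int × Int × Int × Int × Int

-- One iteration of A's for-loop, given ground_truth[i] and prevision[i].
-- The final 'elif ground_truth[i] >= C' of each chain is always true for ints when the
-- earlier branches failed, so it is ported as the trailing else.
def pvStepA (s : ScoreState) (gv pv : Int) : ScoreState :=
  let truth : String :=
    if gv < 18 then "young"
    else if 18 ≤ gv ∧ gv < 46 then "early adult"
    else if 46 ≤ gv ∧ gv < 66 then "adult"
    else "elder"
  let test : String :=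
    if pv < 18 then "young"
    else if 18 ≤ pv ∧ pv < 46 then "early adult"
    else if 46 ≤ pv ∧ pv < 66 then "adult"
    else "elder"
  let (young, early_adult, adult, elder, e_young, e_early_adult, e_adult, e_elder) := s
  let (young, early_adult, adult, elder) :=
    if truth == test then
      if truth == "young" then (young + 1, early_adult, adult, elder)
      else if truth == "early adult" then (young, early_adult + 1, adult, elder)
      else if truth == "adult" then (young, early_adult, adult + 1, elder)
      else if truth == "elder" then (young, early_adult, adult, elder + 1)
      else (young, early_adult, adult, elder)
    else (young, early_adult, adult, elder)
  let (e_young, e_early_adult, e_adult, e_elder) :=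
    if truth != test then
      if truth == "young" then (e_young + 1, e_early_adult, e_adult, e_elder)
      else if truth == "early adult" then (e_young, e_early_adult + 1, e_adult, e_elder)
      else if truth == "adult" then (e_young, e_early_adult, e_adult + 1, e_elder)
      else if truth == "elder" then (e_young, e_early_adult, e_adult, e_elder + 1)
      else (e_young, e_early_adult, e_adult, e_elder)
    else (e_young, e_early_adult, e_adult, e_elder)
  (young, early_adult, adult, elder, e_young, e_early_adult, e_adult, e_elder)

def score_per_band (prevision : List Int) (ground_truth : List Int) : List Int :=
  -- for i in range(0, len(prevision)): indices are nonnegative; under Pre_ both accesses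
  -- are in range, so ground_truth[i] / prevision[i] are ported as getD i 0 (exact there).
  let fin : ScoreState :=
    (List.range prevision.length).foldl
      (fun s i => pvStepA s (ground_truth.getD i 0) (prevision.getD i 0))
      (0, 0, 0, 0, 0, 0, 0, 0)
  let (young, early_adult, adult, elder, e_young, e_early_adult, e_adult, e_elder) := fin
  -- score = [0]*8 then eight assignments
  ((((((((List.replicate 8 (0 : Int)).set 0 young).set 1 early_adult).set 2 adult).set 3
      elder).set 4 e_young).set 5 e_early_adult).set 6 e_adult).set 7 e_elder

-- ===== PORT B =====
-- band(x) = (x >= 18) + (x >= 46) + (x >= 66): Python bools add up to an int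
def pvBandB (x : Int) : Int :=
  (if x ≥ 18 then 1 else 0) + (if x ≥ 46 then 1 else 0) + (if x ≥ 66 then 1 else 0)

def score_per_band_alt (prevision : List Int) (ground_truth : List Int) : List Int :=
  -- truths = [band(ground_truth[i]) for i in range(len(prevision))]; in-range under Pre_,
  -- so ground_truth[i] is ported as getD i 0 (exact there)
  let truths := (List.range prevision.length).map (fun i => pvBandB (ground_truth.getD i 0))
  let preds := prevision.map pvBandB
  let hits := ((truths.zip preds).filter (fun pr => pr.1 == pr.2)).map (fun pr => pr.1)
  ((List.range 4).map (fun b => (PySem.List.count hits ((b : Nat) : Int) : Int)))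
  ++ ((List.range 4).map (fun b =>
        (PySem.List.count truths ((b : Nat) : Int) : Int)
          - (PySem.List.count hits ((b : Nat) : Int) : Int)))

-- ===== PRECONDITION & SPEC =====
-- Pre_ excludes exactly the inputs where A raises IndexError (ground_truth[i] out of range).
def Pre_score_per_band (prevision : List Int) (ground_truth : List Int) : Prop :=
  prevision.length ≤ ground_truth.length
instance (prevision : List Int) (ground_truth : List Int) : Decidable (Pre_score_per_band prevision ground_truth) := by unfold Pre_score_per_band; infer_instance

def pvWitness_score_per_band : List Int × List Int := ([10, 50, 70], [20, 50, 3])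

def Spec_score_per_band (prevision : List Int) (ground_truth : List Int) (out : List Int) : Prop := out = score_per_band_alt prevision ground_truth
instance (prevision : List Int) (ground_truth : List Int) (out : List Int) : Decidable (Spec_score_per_band prevision ground_truth out) := by unfold Spec_score_per_band; infer_instance

-- ===== CLAIM (what is proved, stated in full; the proofs are below) =====
def Claim_equal_score_per_band : Prop := ∀ (prevision : List Int) (ground_truth : List Int), Dom_score_per_band prevision ground_truth → Pre_score_per_band prevision ground_truth → Spec_score_per_band prevision ground_truth (score_per_band prevision ground_truth)

-- ===== LEMMAS AND PROOFS =====

-- counts over the list of (gv, pv) pairs, phrased as B reads them off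
def pvHit (b : Int) (l : List (Int × Int)) : Int :=
  (l.countP (fun q => pvBandB q.1 == b && pvBandB q.1 == pvBandB q.2) : Int)
def pvTot (b : Int) (l : List (Int × Int)) : Int :=
  (l.countP (fun q => pvBandB q.1 == b) : Int)

lemma pvBandB_cases (g : Int) :
    pvBandB g = 0 ∨ pvBandB g = 1 ∨ pvBandB g = 2 ∨ pvBandB g = 3 := by
  unfold pvBandB; split_ifs <;> simp

-- the band's string label, relating A's labels to B's arithmetic band index
def pvName (b : Int) : String :=
  if b = 0 then "young" else if b = 1 then "early adult" else if b = 2 then "adult" else "elder"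

lemma pvChain_eq (g : Int) :
    (if g < 18 then "young" else if 18 ≤ g ∧ g < 46 then "early adult"
     else if 46 ≤ g ∧ g < 66 then "adult" else "elder") = pvName (pvBandB g) := by
  simp only [pvName, pvBandB]
  split_ifs <;> first | rfl | omega

set_option maxHeartbeats 1600000 in
lemma pvStepA_eq (s : ScoreState) (gv pv : Int) :
    pvStepA s gv pv =
      (s.1 + (if pvBandB gv = 0 ∧ pvBandB gv = pvBandB pv then 1 else 0),
       s.2.1 + (if pvBandB gv = 1 ∧ pvBandB gv = pvBandB pv then 1 else 0),
       s.2.2.1 + (if pvBandB gv = 2 ∧ pvBandB gv = pvBandB pv then 1 else 0),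
       s.2.2.2.1 + (if pvBandB gv = 3 ∧ pvBandB gv = pvBandB pv then 1 else 0),
       s.2.2.2.2.1 + (if pvBandB gv = 0 ∧ ¬ pvBandB gv = pvBandB pv then 1 else 0),
       s.2.2.2.2.2.1 + (if pvBandB gv = 1 ∧ ¬ pvBandB gv = pvBandB pv then 1 else 0),
       s.2.2.2.2.2.2.1 + (if pvBandB gv = 2 ∧ ¬ pvBandB gv = pvBandB pv then 1 else 0),
       s.2.2.2.2.2.2.2 + (if pvBandB gv = 3 ∧ ¬ pvBandB gv = pvBandB pv then 1 else 0)) := by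
  obtain ⟨s0, s1, s2, s3, s4, s5, s6, s7⟩ := s
  simp only [pvStepA, pvChain_eq]
  rcases pvBandB_cases gv with h | h | h | h <;>
    rcases pvBandB_cases pv with h' | h' | h' | h' <;>
      simp [h, h', pvName]

-- A's loop accumulates exactly these counts
lemma pvFoldA_counts (l : List (Int × Int)) (s : ScoreState) :
    l.foldl (fun s q => pvStepA s q.1 q.2) s =
      (s.1 + pvHit 0 l, s.2.1 + pvHit 1 l, s.2.2.1 + pvHit 2 l, s.2.2.2.1 + pvHit 3 l,
       s.2.2.2.2.1 + (pvTot 0 l - pvHit 0 l), s.2.2.2.2.2.1 + (pvTot 1 l - pvHit 1 l),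
       s.2.2.2.2.2.2.1 + (pvTot 2 l - pvHit 2 l), s.2.2.2.2.2.2.2 + (pvTot 3 l - pvHit 3 l)) := by
  induction l generalizing s with
  | nil =>
    obtain ⟨s0, s1, s2, s3, s4, s5, s6, s7⟩ := s
    simp [pvHit, pvTot]
  | cons q l ih =>
    obtain ⟨s0, s1, s2, s3, s4, s5, s6, s7⟩ := s
    rw [List.foldl_cons, ih, pvStepA_eq]
    simp only [pvHit, pvTot, List.countP_cons, Prod.mk.injEq]
    rcases pvBandB_cases q.1 with h | h | h | h <;>
      rcases pvBandB_cases q.2 with h' | h' | h' | h' <;>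
        simp [h, h'] <;> ring

-- the range/getD traversal equals the fold over the zip of (truth, prevision) pairs
lemma pvRange_zip {α : Type} (p g : List Int) (h : p.length ≤ g.length)
    (f : α → Int × Int → α) (s : α) :
    (List.range p.length).foldl (fun s i => f s (g.getD i 0, p.getD i 0)) s
    = ((g.take p.length).zip p).foldl f s := by
  induction p generalizing g s with
  | nil => simp
  | cons a p' ih =>
    cases g with
    | nil => simp at h
    | cons b g' =>
      simp only [List.length_cons, List.range_succ_eq_map, List.foldl_cons, List.foldl_map,
        List.getD_cons_succ, List.getD_cons_zero, List.take_succ_cons, List.zip_cons_cons]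
      exact ih g' (by simpa using h) _

lemma pvTruths_eq (p g : List Int) (h : p.length ≤ g.length) :
    (List.range p.length).map (fun i => pvBandB (g.getD i 0))
      = (g.take p.length).map pvBandB := by
  induction p generalizing g with
  | nil => simp
  | cons a p' ih =>
    cases g with
    | nil => simp at h
    | cons b g' =>
      simp only [List.length_cons, List.range_succ_eq_map, List.map_cons, List.map_map,
        List.take_succ_cons]
      refine congrArg (pvBandB b :: ·) ?_
      simpa using ih g' (by simpa using h)

-- B's count over the hit-band list equals the pair count pvHit
lemma pvCountHits (gt p : List Int) (b : Int) :
    (List.count b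
      ((((gt.map pvBandB).zip (p.map pvBandB)).filter (fun pr => pr.1 == pr.2)).map
        (fun pr => pr.1)) : Int) = pvHit b (gt.zip p) := by
  induction gt generalizing p with
  | nil => simp [pvHit]
  | cons a gt' ih =>
    cases p with
    | nil => simp [pvHit]
    | cons c p' =>
      have hih := ih p'
      simp only [pvHit] at hih ⊢
      simp only [List.map_cons, List.zip_cons_cons, List.filter_cons]
      by_cases h2 : pvBandB a = pvBandB c
      · have e1 : (pvBandB a == pvBandB c) = true := by simp [h2]
        by_cases h1 : pvBandB a = b
        · have e2 : (pvBandB a == b) = true := by simp [h1]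
          simp [e1, e2, List.count_cons, hih]
        · have e2 : (pvBandB a == b) = false := by simp [h1]
          simp [e1, e2, List.count_cons, hih]
      · have e1 : (pvBandB a == pvBandB c) = false := by simp [h2]
        simp [e1, hih]

-- B's count over the truth-band list equals the pair count pvTot
lemma pvCountTot (gt p : List Int) (h : gt.length ≤ p.length) (b : Int) :
    (List.count b (gt.map pvBandB) : Int) = pvTot b (gt.zip p) := by
  induction gt generalizing p with
  | nil => simp [pvTot]
  | cons a gt' ih =>
    cases p with
    | nil => simp at h
    | cons c p' =>
      have hih := ih p' (by simpa using h)
      simp only [pvTot] at hih ⊢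
      simp only [List.map_cons, List.zip_cons_cons, List.count_cons]
      by_cases hb : pvBandB a = b <;> simp [hb, hih]

-- ===== VERDICT (by name: the statement is the Claim_ definition above) =====
theorem score_per_band_spec : Claim_equal_score_per_band := by
  intro p g _ hpre
  unfold Spec_score_per_band score_per_band score_per_band_alt
  have hle : (g.take p.length).length ≤ p.length := by simp
  rw [pvRange_zip p g hpre (fun s q => pvStepA s q.1 q.2), pvFoldA_counts,
      pvTruths_eq p g hpre]
  have h0 := pvCountHits (g.take p.length) p 0
  have h1 := pvCountHits (g.take p.length) p 1
  have h2 := pvCountHits (g.take p.length) p 2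
  have h3 := pvCountHits (g.take p.length) p 3
  have t0 := pvCountTot (g.take p.length) p hle 0
  have t1 := pvCountTot (g.take p.length) p hle 1
  have t2 := pvCountTot (g.take p.length) p hle 2
  have t3 := pvCountTot (g.take p.length) p hle 3
  simp only [PySem.List.count, List.range_succ, List.range_zero, List.map_cons, List.map_nil,
    List.nil_append, List.cons_append, List.replicate,
    List.set_cons_zero, List.set_cons_succ, zero_add, Nat.cast_zero, Nat.cast_one,
    Nat.cast_ofNat, List.cons.injEq, and_true]
  refine ⟨h0.symm, h1.symm, h2.symm, h3.symm, ?_, ?_, ?_, ?_⟩ <;> omega
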